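-- pv_equiv track=rewrite | github.com/tlijkkkk/mark_v | leetcode-practice/leetcode_practice/two_pointers/sliding_windows/leetcode1892_distinct_nums_subarray.py | distinct_nums_each_subarray
-- ===== SOURCE A (Python) =====
-- from typing import List, Dict
-- from collections import defaultdict
--
-- def distinct_nums_each_subarray(nums: List[int], k: int) -> List[int]:
--     dt_unique: Dict[int, int] = defaultdict(int)
--     i = 0
--     result: List[int] = []
--
--     for j in range(len(nums)):
--         dt_unique[nums[j]] += 1
--
--         while j - i + 1 > k:
--             dt_unique[nums[i]] -= 1
--             if dt_unique[nums[i]] == 0: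
--                 dt_unique.pop(nums[i])
--             i += 1
--
--         if j - i + 1 == k:
--             result.append(len(dt_unique))
--
--     return result
-- ===== SOURCE B (Python) =====
-- def distinct_nums_each_subarray(nums, k):
--     return [len(set(nums[i:i + k])) for i in range(len(nums) - k + 1)]
-- ===== Notes on version B (the rewrite author's own statement) =====
-- stated objective: simpler
-- what changed: Replaces the incremental sliding-window count-dict (add right element, shrink left, pop zero counts) with a one-line comprehension that independently computes len(set(window)) for each start index.
-- intended difference: For k == 0 A returns len(nums) zeros (its window logic appends once per element), while B returns len(nums)+1 zeros, one per empty subarray start position 0..len(nums), which is the uniform count-per-window answer. — e.g. on distinct_nums_each_subarray([5], 0): A returns [0], B returns [0, 0]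
-- outside the precondition, e.g. on distinct_nums_each_subarray([], -1): A returns [], B returns [0, 0]; on distinct_nums_each_subarray([1, 2], -1): A raises IndexError, B returns [1, 0, 0, 0]
import Mathlib
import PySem

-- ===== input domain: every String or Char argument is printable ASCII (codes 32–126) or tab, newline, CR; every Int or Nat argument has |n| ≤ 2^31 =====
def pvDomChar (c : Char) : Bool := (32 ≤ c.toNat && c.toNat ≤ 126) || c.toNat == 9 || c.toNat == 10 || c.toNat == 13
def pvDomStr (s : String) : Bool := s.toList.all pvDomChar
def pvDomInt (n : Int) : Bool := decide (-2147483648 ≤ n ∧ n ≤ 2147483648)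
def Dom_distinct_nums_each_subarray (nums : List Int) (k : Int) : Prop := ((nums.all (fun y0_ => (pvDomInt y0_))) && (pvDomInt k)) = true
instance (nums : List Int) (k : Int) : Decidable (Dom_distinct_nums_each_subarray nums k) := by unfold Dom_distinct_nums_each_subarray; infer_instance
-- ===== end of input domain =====

-- ===== PORT A =====
-- B is a one-line comprehension recomputing len(set(window)) per start index instead of A's
-- incremental count-dict sliding window (simpler; same asymptotic cost was not claimed).

-- the 'while j - i + 1 > k' loop of A; fuel bounds the iterations (i increases each step).
def pvWhileA (nums : List Int) (k : Int) (j : Int) :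
    PySem.Dict Int Int × Int → Nat → PySem.Dict Int Int × Int
  | (dt, i), 0 => (dt, i)
  | (dt, i), fuel+1 =>
    if j - i + 1 > k then
      match PySem.List.pyGet? nums i with
      | none => (dt, i)
      | some x =>
        let dt1 := dt.insert x (dt.getD x 0 - 1)
        let dt2 := if dt1.getD x 0 = 0 then dt1.erase x else dt1
        pvWhileA nums k j (dt2, i + 1) fuel
    else (dt, i)

def distinct_nums_each_subarray (nums : List Int) (k : Int) : List Int :=
  (((PySem.List.pyRange 0 (nums.length : Int) 1).foldl
    (fun (st : PySem.Dict Int Int × Int × List Int) j =>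
      match PySem.List.pyGet? nums j with
      | none => st
      | some x =>
        let dt := st.1.insert x (st.1.getD x 0 + 1)
        let p := pvWhileA nums k j (dt, st.2.1) (nums.length + 1)
        let res := if j - p.2 + 1 = k then st.2.2 ++ [(PySem.Dict.size p.1 : Int)] else st.2.2
        (p.1, p.2, res))
    (PySem.Dict.empty, 0, ([] : List Int))) : PySem.Dict Int Int × Int × List Int).2.2

-- ===== PORT B =====
def distinct_nums_each_subarray_alt (nums : List Int) (k : Int) : List Int :=
  (PySem.List.pyRange 0 ((nums.length : Int) - k + 1) 1).map
    (fun i => ((PySem.Set.ofList (PySem.List.slice nums (some i) (some (i + k)))).length : Int))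


-- ===== PRECONDITION & SPEC =====
-- Pre_ excludes k < 0: there A raises IndexError on every non-empty list (the shrink loop walks
-- i past the end of nums), and on the empty list A's [] is an accident of the empty range.
def Pre_distinct_nums_each_subarray (nums : List Int) (k : Int) : Prop := 0 ≤ k
instance (nums : List Int) (k : Int) : Decidable (Pre_distinct_nums_each_subarray nums k) := by unfold Pre_distinct_nums_each_subarray; infer_instance
def pvWitness_distinct_nums_each_subarray : List Int × Int := ([1, 2, 1, 3], 2)

-- For k == 0 A returns len(nums) zeros (its window logic appends once per element), while B
-- returns len(nums)+1 zeros, one per empty subarray start position 0..len(nums), which is the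
-- uniform count-per-window answer.
def D_distinct_nums_each_subarray (nums : List Int) (k : Int) : Prop := k = 0
instance (nums : List Int) (k : Int) : Decidable (D_distinct_nums_each_subarray nums k) := by unfold D_distinct_nums_each_subarray; infer_instance

def Spec_distinct_nums_each_subarray (nums : List Int) (k : Int) (out : List Int) : Prop := ¬ D_distinct_nums_each_subarray nums k → out = distinct_nums_each_subarray_alt nums k
instance (nums : List Int) (k : Int) (out : List Int) : Decidable (Spec_distinct_nums_each_subarray nums k out) := by unfold Spec_distinct_nums_each_subarray; infer_instance

def pvDiffWitness_distinct_nums_each_subarray : List Int × Int := ([5], 0)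
def pvDiffWitnessOut_distinct_nums_each_subarray : (List Int) × (List Int) := ([0], [0, 0])

-- ===== CLAIM (what is proved, stated in full; the proofs are below) =====
def Claim_unchanged_distinct_nums_each_subarray : Prop := ∀ (nums : List Int) (k : Int), Dom_distinct_nums_each_subarray nums k → Pre_distinct_nums_each_subarray nums k → Spec_distinct_nums_each_subarray nums k (distinct_nums_each_subarray nums k)
def Claim_changed_distinct_nums_each_subarray : Prop := Dom_distinct_nums_each_subarray (pvDiffWitness_distinct_nums_each_subarray.1) (pvDiffWitness_distinct_nums_each_subarray.2) ∧ Pre_distinct_nums_each_subarray (pvDiffWitness_distinct_nums_each_subarray.1) (pvDiffWitness_distinct_nums_each_subarray.2) ∧ D_distinct_nums_each_subarray (pvDiffWitness_distinct_nums_each_subarray.1) (pvDiffWitness_distinct_nums_each_subarray.2) ∧ distinct_nums_each_subarray (pvDiffWitness_distinct_nums_each_subarray.1) (pvDiffWitness_distinct_nums_each_subarray.2) = pvDiffWitnessOut_distinct_nums_each_subarray.1 ∧ distinct_nums_each_subarray_alt (pvDiffWitness_distinct_nums_each_subarray.1) (pvDiffWitness_distinct_nums_each_subarray.2) = pvDiffWitnessOut_distinct_nums_each_subarray.2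 ∧ pvDiffWitnessOut_distinct_nums_each_subarray.1 ≠ pvDiffWitnessOut_distinct_nums_each_subarray.2
def Claim_exact_distinct_nums_each_subarray : Prop := ∀ (nums : List Int) (k : Int), Dom_distinct_nums_each_subarray nums k → Pre_distinct_nums_each_subarray nums k → D_distinct_nums_each_subarray nums k → distinct_nums_each_subarray nums k ≠ distinct_nums_each_subarray_alt nums k

-- ===== LEMMAS AND PROOFS =====
-- proof-side helpers
def pvStep (nums : List Int) (k : Int) (st : PySem.Dict Int Int × Int × List Int) (j : Int) :
    PySem.Dict Int Int × Int × List Int :=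
  match PySem.List.pyGet? nums j with
  | none => st
  | some x =>
    let dt := st.1.insert x (st.1.getD x 0 + 1)
    let p := pvWhileA nums k j (dt, st.2.1) (nums.length + 1)
    let res := if j - p.2 + 1 = k then st.2.2 ++ [(PySem.Dict.size p.1 : Int)] else st.2.2
    (p.1, p.2, res)

theorem pvA_eq_foldl (nums : List Int) (k : Int) :
    distinct_nums_each_subarray nums k =
      ((PySem.List.pyRange 0 (nums.length : Int) 1).foldl (pvStep nums k)
        (PySem.Dict.empty, 0, ([] : List Int))).2.2 := rfl

def pvWin (nums : List Int) (a b : Nat) : List Int := (nums.take b).drop a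

-- dict ↔ window invariant (count of every element, distinct keys, same membership)
def pvDInv (nums : List Int) (dt : PySem.Dict Int Int) (a b : Nat) : Prop :=
  (∀ x : Int, dt.getD x 0 = ((pvWin nums a b).count x : Int)) ∧
  dt.keys.Nodup ∧
  (∀ x : Int, x ∈ dt.keys ↔ x ∈ pvWin nums a b)

def pvInv (nums : List Int) (k : Int) (jn : Nat) (st : PySem.Dict Int Int × Int × List Int) : Prop :=
  st.2.1 = ((jn - k.toNat : Nat) : Int) ∧
  pvDInv nums st.1 (jn - k.toNat) jn ∧
  st.2.2 = (PySem.List.pyRange 0 ((jn : Int) - k + 1) 1).map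
    (fun i => ((PySem.Set.ofList (PySem.List.slice nums (some i) (some (i + k)))).length : Int))

-- erase lemmas (not in the prelude)
theorem pv_get?_erase_self (d : PySem.Dict Int Int) (x : Int) : (d.erase x).get? x = none := by
  simp only [PySem.Dict.erase, PySem.Dict.get?, Option.map_eq_none_iff, List.find?_eq_none]
  intro p hp
  have := List.of_mem_filter hp
  simpa using this

theorem pv_get?_erase_ne (d : PySem.Dict Int Int) (x y : Int) (h : y ≠ x) :
    (d.erase x).get? y = d.get? y := by
  simp only [PySem.Dict.erase, PySem.Dict.get?]
  congr 1
  induction d.items with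
  | nil => rfl
  | cons p rest ih =>
    rcases eq_or_ne p.1 x with hp | hp
    · rw [List.filter_cons_of_neg (by simp [hp]), List.find?_cons_of_neg (by simp [hp, Ne.symm h]), ih]
    · rcases eq_or_ne p.1 y with hy | hy
      · rw [List.filter_cons_of_pos (by simp [hp]), List.find?_cons_of_pos (by simp [hy]),
          List.find?_cons_of_pos (by simp [hy])]
      · rw [List.filter_cons_of_pos (by simp [hp]), List.find?_cons_of_neg (by simp [hy]),
          List.find?_cons_of_neg (by simp [hy]), ih]

theorem pv_keys_erase (d : PySem.Dict Int Int) (x : Int) :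
    (d.erase x).keys = d.keys.filter (fun y => y ≠ x) := by
  simp only [PySem.Dict.erase, PySem.Dict.keys]
  induction d.items with
  | nil => rfl
  | cons p rest ih =>
    by_cases hp : p.1 = x <;> simp [List.filter_cons, hp, ih]

theorem pv_head_win (nums : List Int) (a b : Nat) (ha : a < b) (han : a < nums.length) :
    pvWin nums a b = nums[a] :: pvWin nums (a+1) b := by
  unfold pvWin
  rw [List.drop_eq_getElem_cons (by simp; omega)]
  simp [List.getElem_take]

theorem pv_snoc_win (nums : List Int) (a b : Nat) (hab : a ≤ b) (hb : b < nums.length) :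
    pvWin nums a (b+1) = pvWin nums a b ++ [nums[b]] := by
  unfold pvWin
  rw [List.take_succ, List.getElem?_eq_getElem hb, List.drop_append_of_le_length (by simp; omega)]
  simp

theorem pv_win_empty (nums : List Int) (a b : Nat) (h : b ≤ a) : pvWin nums a b = [] := by
  unfold pvWin
  rw [List.drop_eq_nil_iff]
  simp; omega

-- distinct size: keys ↔ membership in l gives size = |set(l)|
theorem pv_size_eq (dt : PySem.Dict Int Int) (l : List Int)
    (hn : dt.keys.Nodup) (hm : ∀ x : Int, x ∈ dt.keys ↔ x ∈ l) :
    dt.size = (PySem.Set.ofList l).length := by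
  have hperm : dt.keys.Perm (PySem.Set.ofList l) := by
    rw [List.perm_ext_iff_of_nodup hn (PySem.Set.nodup_ofList l)]
    intro a; rw [hm a, PySem.Set.mem_ofList]
  have := hperm.length_eq
  simpa [PySem.Dict.size, PySem.Dict.keys] using this

theorem pvWhileA_succ (nums : List Int) (k j : Int) (dt : PySem.Dict Int Int) (i : Int)
    (fuel : Nat) :
    pvWhileA nums k j (dt, i) (fuel + 1) =
      (if j - i + 1 > k then
        match PySem.List.pyGet? nums i with
        | none => (dt, i)
        | some x =>
          let dt1 := dt.insert x (dt.getD x 0 - 1)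
          let dt2 := if dt1.getD x 0 = 0 then dt1.erase x else dt1
          pvWhileA nums k j (dt2, i + 1) fuel
      else (dt, i)) := rfl

theorem pv_shrink (nums : List Int) (dt : PySem.Dict Int Int) (a b : Nat)
    (hab : a < b) (han : a < nums.length) (hd : pvDInv nums dt a b) :
    pvDInv nums
      (let dt1 := dt.insert nums[a] (dt.getD nums[a] 0 - 1)
       if dt1.getD nums[a] 0 = 0 then dt1.erase nums[a] else dt1)
      (a + 1) b := by
  obtain ⟨hc, hn, hm⟩ := hd
  have hwin := pv_head_win nums a b hab han
  set x0 := nums[a] with hx0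
  set tl := pvWin nums (a+1) b with htl
  have hcx0 : dt.getD x0 0 = ((tl.count x0 : Nat) : Int) + 1 := by
    rw [hc x0, hwin]; simp
  have h1self : (dt.insert x0 (dt.getD x0 0 - 1)).getD x0 0 = ((tl.count x0 : Nat) : Int) := by
    rw [PySem.Dict.getD_insert_self, hcx0]; ring
  show pvDInv nums
    (if (dt.insert x0 (dt.getD x0 0 - 1)).getD x0 0 = 0
     then (dt.insert x0 (dt.getD x0 0 - 1)).erase x0 else dt.insert x0 (dt.getD x0 0 - 1)) (a+1) b
  by_cases hmem : x0 ∈ tl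
  · -- count stays positive: key kept
    have hne : ((tl.count x0 : Nat) : Int) ≠ 0 := by
      have := List.count_pos_iff.mpr hmem; omega
    rw [if_neg (by rw [h1self]; exact hne)]
    refine ⟨?_, PySem.Dict.nodup_keys_insert dt x0 _ hn, ?_⟩
    · intro y
      rcases eq_or_ne y x0 with rfl | hy
      · exact h1self
      · rw [PySem.Dict.getD_insert_of_ne _ _ _ hy, hc y, hwin, List.count_cons]
        simp [Ne.symm hy, ← htl]
    · intro y
      rw [PySem.Dict.mem_keys_insert, hm y, hwin]
      constructor
      · rintro (rfl | h)
        · exact hmem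
        · rcases List.mem_cons.mp h with rfl | h' <;> [exact hmem; exact h']
      · intro h; exact Or.inr (List.mem_cons_of_mem _ h)
  · -- count drops to zero: key popped
    have hz : tl.count x0 = 0 := List.count_eq_zero.mpr hmem
    have hzz : ((tl.count x0 : Nat) : Int) = 0 := by rw [hz]; rfl
    rw [if_pos (by rw [h1self]; exact hzz)]
    refine ⟨?_, ?_, ?_⟩
    · intro y
      rcases eq_or_ne y x0 with rfl | hy
      · rw [PySem.Dict.getD_eq_get?_getD, pv_get?_erase_self]
        simp [← htl, hz]
      · rw [PySem.Dict.getD_eq_get?_getD, pv_get?_erase_ne _ _ _ hy,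
          ← PySem.Dict.getD_eq_get?_getD, PySem.Dict.getD_insert_of_ne _ _ _ hy, hc y, hwin,
          List.count_cons]
        simp [Ne.symm hy, ← htl]
    · rw [pv_keys_erase]
      exact (PySem.Dict.nodup_keys_insert dt x0 _ hn).filter _
    · intro y
      rw [pv_keys_erase, List.mem_filter]
      simp only [PySem.Dict.mem_keys_insert, hm y, hwin, decide_eq_true_eq]
      constructor
      · rintro ⟨rfl | h, hy⟩
        · simp at hy
        · rcases List.mem_cons.mp h with rfl | h'
          · simp at hy
          · exact h'
      · intro h
        have hyne : y ≠ x0 := by rintro rfl; exact hmem h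
        exact ⟨Or.inr (List.mem_cons_of_mem _ h), by simpa using hyne⟩

theorem pv_while_lemma (nums : List Int) (k : Int) (hk : 1 ≤ k) (jn : Nat) (hj : jn < nums.length)
    (dt : PySem.Dict Int Int) (hd : pvDInv nums dt (jn - k.toNat) (jn + 1)) :
    ∃ dt' : PySem.Dict Int Int,
      pvWhileA nums k (jn : Int) (dt, ((jn - k.toNat : Nat) : Int)) (nums.length + 1) =
        (dt', ((jn + 1 - k.toNat : Nat) : Int)) ∧
      pvDInv nums dt' (jn + 1 - k.toNat) (jn + 1) := by
  have hkc : (k.toNat : Int) = k := Int.toNat_of_nonneg (by omega)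
  by_cases hcase : jn < k.toNat
  · -- window not yet full: the while body never runs
    have h0 : jn - k.toNat = 0 := by omega
    have h1 : jn + 1 - k.toNat = jn - k.toNat := by omega
    refine ⟨dt, ?_, by rw [h1]; exact hd⟩
    rw [pvWhileA_succ, if_neg (by push_cast [h0]; omega), h1]
  · -- window overfull by one: the while body runs exactly once
    obtain ⟨m, hm⟩ : ∃ m, nums.length = m + 1 := ⟨nums.length - 1, by omega⟩
    have hs0 : jn - k.toNat < nums.length := by omega
    have hget : PySem.List.pyGet? nums ((jn - k.toNat : Nat) : Int) =
        some nums[jn - k.toNat] := by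
      rw [PySem.List.pyGet?_natCast, List.getElem?_eq_getElem hs0]
    have hd2 := pv_shrink nums dt (jn - k.toNat) (jn + 1) (by omega) hs0 hd
    refine ⟨_, ?_, by have h1 : jn + 1 - k.toNat = jn - k.toNat + 1 := by omega
                      rw [h1]; exact hd2⟩
    rw [pvWhileA_succ, if_pos (by push_cast; omega), hget]
    simp only
    rw [hm, pvWhileA_succ, if_neg (by push_cast; omega)]
    rw [show ((jn - k.toNat : Nat) : Int) + 1 = ((jn + 1 - k.toNat : Nat) : Int) by omega]

theorem pv_grow (nums : List Int) (dt : PySem.Dict Int Int) (a b : Nat)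
    (hab : a ≤ b) (hb : b < nums.length) (hd : pvDInv nums dt a b) :
    pvDInv nums (dt.insert nums[b] (dt.getD nums[b] 0 + 1)) a (b + 1) := by
  obtain ⟨hc, hn, hm⟩ := hd
  have hwin := pv_snoc_win nums a b hab hb
  refine ⟨?_, PySem.Dict.nodup_keys_insert dt nums[b] _ hn, ?_⟩
  · intro y
    rcases eq_or_ne y nums[b] with rfl | hy
    · rw [PySem.Dict.getD_insert_self, hc, hwin, List.count_append]
      simp
    · rw [PySem.Dict.getD_insert_of_ne _ _ _ hy, hc y, hwin, List.count_append]
      simp [Ne.symm hy]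
  · intro y
    rw [PySem.Dict.mem_keys_insert, hm y, hwin, List.mem_append]
    simp [or_comm]

theorem pv_step_lemma (nums : List Int) (k : Int) (hk : 1 ≤ k) (jn : Nat) (hj : jn < nums.length)
    (st : PySem.Dict Int Int × Int × List Int) (h : pvInv nums k jn st) :
    pvInv nums k (jn + 1) (pvStep nums k st (jn : Int)) := by
  obtain ⟨hi, hD, hres⟩ := h
  have hkc : (k.toNat : Int) = k := Int.toNat_of_nonneg (by omega)
  have hget : PySem.List.pyGet? nums ((jn : Nat) : Int) = some nums[jn] := by
    rw [PySem.List.pyGet?_natCast, List.getElem?_eq_getElem hj]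
  have hgrow := pv_grow nums st.1 (jn - k.toNat) jn (by omega) hj hD
  obtain ⟨dt', hwhile, hd'⟩ := pv_while_lemma nums k hk jn hj
    (st.1.insert nums[jn] (st.1.getD nums[jn] 0 + 1)) hgrow
  unfold pvStep
  rw [hget]
  simp only [hi, hwhile]
  refine ⟨rfl, hd', ?_⟩
  by_cases hfull : k.toNat ≤ jn + 1
  · -- a full window ends at jn: one value is appended
    rw [if_pos (by omega), hres]
    have hrange : PySem.List.pyRange 0 (((jn + 1 : Nat) : Int) - k + 1) 1 =
        PySem.List.pyRange 0 ((jn : Int) - k + 1) 1 ++ [(jn : Int) - k + 1] := by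
      rw [show ((jn + 1 : Nat) : Int) - k + 1 = ((jn : Int) - k + 1) + 1 by push_cast; ring]
      exact PySem.List.pyRange_one_succ_right (by omega)
    rw [hrange, List.map_append]
    congr 1
    simp only [List.map_cons, List.map_nil]
    congr 1
    have hs1 : (jn : Int) - k + 1 = ((jn + 1 - k.toNat : Nat) : Int) := by omega
    have hs2 : ((jn + 1 - k.toNat : Nat) : Int) + k = ((jn + 1 - k.toNat + k.toNat : Nat) : Int) := by
      omega
    rw [hs1, hs2, PySem.List.slice_natCast]
    have hslice : (nums.drop (jn + 1 - k.toNat)).take (jn + 1 - k.toNat + k.toNat - (jn + 1 - k.toNat))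
        = pvWin nums (jn + 1 - k.toNat) (jn + 1) := by
      unfold pvWin
      rw [List.drop_take]
      congr 1
      omega
    rw [hslice]
    rw [pv_size_eq dt' _ hd'.2.1 hd'.2.2]
  · -- window still growing: nothing appended, both ranges empty
    rw [if_neg (by omega), hres,
      PySem.List.pyRange_one_eq_nil (a := 0) (b := (jn : Int) - k + 1) (by omega),
      PySem.List.pyRange_one_eq_nil (a := 0) (b := ((jn + 1 : Nat) : Int) - k + 1) (by push_cast; omega)]

theorem pv_init (nums : List Int) (k : Int) (hk : 1 ≤ k) :
    pvInv nums k 0 (PySem.Dict.empty, 0, ([] : List Int)) := by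
  refine ⟨by simp, ⟨?_, ?_, ?_⟩, ?_⟩
  · intro x; simp [pv_win_empty nums _ 0 (Nat.zero_le _), PySem.Dict.getD_empty]
  · simp [PySem.Dict.keys_empty]
  · intro x; simp [pv_win_empty nums _ 0 (Nat.zero_le _), PySem.Dict.keys_empty]
  · rw [PySem.List.pyRange_one_eq_nil (by omega)]; rfl

theorem pv_fold_inv (nums : List Int) (k : Int) (hk : 1 ≤ k) (jn : Nat) (hj : jn ≤ nums.length) :
    pvInv nums k jn ((PySem.List.pyRange 0 (jn : Int) 1).foldl (pvStep nums k)
      (PySem.Dict.empty, 0, ([] : List Int))) := by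
  induction jn with
  | zero => simpa [PySem.List.pyRange_one_eq_nil] using pv_init nums k hk
  | succ m ih =>
    have hm : m < nums.length := by omega
    have : PySem.List.pyRange 0 ((m + 1 : Nat) : Int) 1 =
        PySem.List.pyRange 0 (m : Int) 1 ++ [(m : Int)] := by
      push_cast
      exact PySem.List.pyRange_one_succ_right (by positivity)
    rw [this, List.foldl_append]
    simpa using pv_step_lemma nums k hk m hm _ (ih (by omega))

theorem pv_equal (nums : List Int) (k : Int) (hk : 1 ≤ k) :
    distinct_nums_each_subarray nums k = distinct_nums_each_subarray_alt nums k := by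
  have h := (pv_fold_inv nums k hk nums.length le_rfl).2.2
  rw [pvA_eq_foldl]
  rw [h]
  rfl

theorem pv_k0_step (nums : List Int) (jn : Nat) (hj : jn < nums.length) (res : List Int) :
    pvStep nums 0 (PySem.Dict.empty, ((jn : Nat) : Int), res) ((jn : Nat) : Int) =
      (PySem.Dict.empty, ((jn : Nat) : Int) + 1, res ++ [(0 : Int)]) := by
  have hget : PySem.List.pyGet? nums ((jn : Nat) : Int) = some nums[jn] := by
    rw [PySem.List.pyGet?_natCast, List.getElem?_eq_getElem hj]
  obtain ⟨m, hm⟩ : ∃ m, nums.length = m + 1 := ⟨nums.length - 1, by omega⟩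
  unfold pvStep
  rw [hget]
  simp only
  rw [pvWhileA_succ, if_pos (by omega), hget]
  simp only [PySem.Dict.getD_empty, PySem.Dict.getD_insert_self]
  norm_num
  rw [hm, pvWhileA_succ, if_neg (by omega)]
  have herase : ((PySem.Dict.empty.insert nums[jn] 1).insert nums[jn] 0).erase nums[jn] =
      (PySem.Dict.empty : PySem.Dict Int Int) := by
    apply PySem.Dict.ext
    simp [PySem.Dict.insert_insert_self, PySem.Dict.erase, PySem.Dict.insert,
      PySem.Dict.empty, PySem.Dict.contains]
  rw [herase]
  norm_num [PySem.Dict.size, PySem.Dict.empty]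

theorem pv_k0_inv (nums : List Int) (jn : Nat) (hj : jn ≤ nums.length) :
    ∃ res : List Int,
      (PySem.List.pyRange 0 ((jn : Nat) : Int) 1).foldl (pvStep nums 0)
        (PySem.Dict.empty, 0, ([] : List Int)) = (PySem.Dict.empty, ((jn : Nat) : Int), res) ∧
      res.length = jn := by
  induction jn with
  | zero => exact ⟨[], by simp [PySem.List.pyRange_one_eq_nil], rfl⟩
  | succ m ih =>
    obtain ⟨res, hfold, hlen⟩ := ih (by omega)
    have hrange : PySem.List.pyRange 0 ((m + 1 : Nat) : Int) 1 =
        PySem.List.pyRange 0 (m : Int) 1 ++ [(m : Int)] := by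
      push_cast
      exact PySem.List.pyRange_one_succ_right (by positivity)
    refine ⟨res ++ [0], ?_, by simp [hlen]⟩
    rw [hrange, List.foldl_append, hfold]
    simp only [List.foldl_cons, List.foldl_nil]
    rw [pv_k0_step nums m (by omega) res]
    push_cast
    ring_nf

theorem pv_len_A_k0 (nums : List Int) :
    (distinct_nums_each_subarray nums 0).length = nums.length := by
  obtain ⟨res, hfold, hlen⟩ := pv_k0_inv nums nums.length le_rfl
  rw [pvA_eq_foldl, hfold]
  exact hlen

theorem pv_len_B_k0 (nums : List Int) :
    (distinct_nums_each_subarray_alt nums 0).length = nums.length + 1 := by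
  unfold distinct_nums_each_subarray_alt
  rw [List.length_map, PySem.List.length_pyRange_one]
  omega

-- ===== VERDICT (by name: the statement is the Claim_ definition above) =====
theorem distinct_nums_each_subarray_spec : Claim_unchanged_distinct_nums_each_subarray := by
  intro nums k _ hpre hnd
  have hk : 1 ≤ k := by
    unfold Pre_distinct_nums_each_subarray at hpre
    unfold D_distinct_nums_each_subarray at hnd
    omega
  exact pv_equal nums k hk

theorem distinct_nums_each_subarray_changed : Claim_changed_distinct_nums_each_subarray := by
  unfold Claim_changed_distinct_nums_each_subarray; decide

theorem distinct_nums_each_subarray_tight : Claim_exact_distinct_nums_each_subarray := by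
  intro nums k _ _ hd heq
  unfold D_distinct_nums_each_subarray at hd
  subst hd
  have hlen := congrArg List.length heq
  rw [pv_len_A_k0, pv_len_B_k0] at hlen
  omega
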